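-- pv_equiv track=rewrite | github.com/adamluo1995/ByteDance-Campus-Challenge | 0219.py | func
-- ===== SOURCE A (Python) =====
-- def xor(seq):
--     tmp = 0
--     for i in seq:
--         tmp += i
--     return 0 if tmp % 2 == 0 else 1
--
-- def func(N, K, seq):
--     r = [-1] * N
--     k = 0
--     for i in range(len(r)):
--         r[i] = xor([seq[i]] + r[i-k:i])
--         if k < K - 1:
--             k += 1
--     return r
-- ===== SOURCE B (Python) =====
-- def func(N, K, seq):
--     r = []
--     w = 0                  # rolling sum of the last min(i, K-1) results
--     cap = max(K - 1, 0)
--     for i in range(N):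
--         v = (seq[i] + w) % 2
--         r.append(v)
--         w += v
--         if i >= cap:
--             w -= r[i - cap]
--     return r
-- ===== Notes on version B (the rewrite author's own statement) =====
-- stated objective: faster
-- what changed: B keeps a rolling sum of the last min(i, K-1) results and updates it in O(1) per index, instead of A's re-slicing and re-summing the window (via the xor helper) at every index.
import Mathlib
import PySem

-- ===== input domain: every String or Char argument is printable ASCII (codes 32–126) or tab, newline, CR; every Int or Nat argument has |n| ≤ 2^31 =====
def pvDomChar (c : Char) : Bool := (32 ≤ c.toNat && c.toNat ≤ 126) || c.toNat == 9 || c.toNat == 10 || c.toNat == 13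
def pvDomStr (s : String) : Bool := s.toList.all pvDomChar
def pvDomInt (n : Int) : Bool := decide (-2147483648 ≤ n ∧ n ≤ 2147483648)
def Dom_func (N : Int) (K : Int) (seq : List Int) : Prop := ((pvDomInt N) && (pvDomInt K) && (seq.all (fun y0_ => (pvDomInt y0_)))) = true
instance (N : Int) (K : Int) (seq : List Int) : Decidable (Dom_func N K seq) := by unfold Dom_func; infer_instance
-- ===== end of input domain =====

-- B replaces A's per-index re-summing of the previous window (O(N*K)) by a rolling
-- window sum updated in O(1) per index (O(N)).

-- ===== PORT A =====
-- xor(seq): sum the list by a loop, return parity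
def pyXor (l : List Int) : Int :=
  let tmp := l.foldl (fun t i => t + i) 0
  if PySem.Int.mod tmp 2 = 0 then 0 else 1

-- one iteration of A's loop body (state = (r, k))
def stepA (K : Int) (seq : List Int) (st : List Int × Int) (i : Nat) : List Int × Int :=
  let r := PySem.List.pySetD st.1 (i : Int)
    (pyXor (PySem.List.pyGetD seq (i : Int) 0 ::
            PySem.List.slice st.1 (some ((i : Int) - st.2)) (some (i : Int))))
  (r, if st.2 < K - 1 then st.2 + 1 else st.2)

def func (N : Int) (K : Int) (seq : List Int) : List Int :=
  let r0 : List Int := List.replicate N.toNat (-1)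
  ((List.range r0.length).foldl (stepA K seq) (r0, 0)).1

-- ===== PORT B =====
-- one iteration of B's loop body (state = (r, w), w = rolling window sum)
def stepB (cap : Int) (seq : List Int) (st : List Int × Int) (i : Nat) : List Int × Int :=
  let v := PySem.Int.mod (PySem.List.pyGetD seq (i : Int) 0 + st.2) 2
  let r := st.1 ++ [v]
  let w := st.2 + v
  (r, if (i : Int) ≥ cap then w - PySem.List.pyGetD r ((i : Int) - cap) 0 else w)

def func_alt (N : Int) (K : Int) (seq : List Int) : List Int :=
  ((List.range N.toNat).foldl (stepB (max (K - 1) 0) seq) ([], 0)).1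

-- ===== PRECONDITION & SPEC =====
-- Pre_ excludes exactly the inputs where Python A raises IndexError: seq[i] with N > len(seq).
def Pre_func (N : Int) (K : Int) (seq : List Int) : Prop := N ≤ (seq.length : Int)
instance (N : Int) (K : Int) (seq : List Int) : Decidable (Pre_func N K seq) := by unfold Pre_func; infer_instance
def pvWitness_func : Int × Int × List Int := (3, 2, [1, 2, 3])

def Spec_func (N : Int) (K : Int) (seq : List Int) (out : List Int) : Prop := out = func_alt N K seq
instance (N : Int) (K : Int) (seq : List Int) (out : List Int) : Decidable (Spec_func N K seq out) := by unfold Spec_func; infer_instance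

-- ===== CLAIM (what is proved, stated in full; the proofs are below) =====
def Claim_equal_func : Prop := ∀ (N : Int) (K : Int) (seq : List Int), Dom_func N K seq → Pre_func N K seq → Spec_func N K seq (func N K seq)

-- ===== LEMMAS AND PROOFS =====

-- parity of a cons through pyXor
lemma pyXor_cons (x : Int) (l : List Int) :
    pyXor (x :: l) = PySem.Int.mod (x + l.sum) 2 := by
  have hsum : List.foldl (fun t i => t + i) 0 (x :: l) = x + l.sum := by
    simpa using PySem.List.foldl_add (x :: l) id 0
  have h0 : 0 ≤ PySem.Int.mod (x + l.sum) 2 := PySem.Int.mod_nonneg _ (by omega)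
  have h1 : PySem.Int.mod (x + l.sum) 2 < 2 := PySem.Int.mod_lt _ (by omega)
  show (if PySem.Int.mod (List.foldl (fun t i => t + i) 0 (x :: l)) 2 = 0 then (0 : Int) else 1)
      = PySem.Int.mod (x + l.sum) 2
  rw [hsum]
  split_ifs with h <;> omega

-- sum of a dropped suffix, peeling one element
lemma sum_drop_succ (l : List Int) (j : Nat) (hj : j < l.length) :
    (l.drop j).sum = l.getD j 0 + (l.drop (j + 1)).sum := by
  rw [List.drop_eq_getElem_cons hj, List.sum_cons, List.getD_eq_getElem l 0 hj]

-- the joint loop invariant after m iterations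
lemma inv (K : Int) (seq : List Int) (n m : Nat) (hm : m ≤ n) :
    ((List.range m).foldl (stepB (max (K - 1) 0) seq) ([], 0)).1.length = m ∧
    ((List.range m).foldl (stepA K seq) (List.replicate n (-1), 0)).1
      = ((List.range m).foldl (stepB (max (K - 1) 0) seq) ([], 0)).1
        ++ List.replicate (n - m) (-1) ∧
    ((List.range m).foldl (stepA K seq) (List.replicate n (-1), 0)).2
      = ((min m (max (K - 1) 0).toNat : Nat) : Int) ∧
    ((List.range m).foldl (stepB (max (K - 1) 0) seq) ([], 0)).2
      = (((List.range m).foldl (stepB (max (K - 1) 0) seq) ([], 0)).1.drop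
          (m - min m (max (K - 1) 0).toNat)).sum := by
  induction m with
  | zero => simp
  | succ m ih =>
    have hm' : m ≤ n := by omega
    obtain ⟨hlen, hr, hk, hw⟩ := ih hm'
    set capN : Nat := (max (K - 1) 0).toNat with hcapN
    set b := (List.range m).foldl (stepB (max (K - 1) 0) seq) ([], 0) with hb
    set a := (List.range m).foldl (stepA K seq) (List.replicate n (-1), 0) with ha
    set kn : Nat := min m capN with hkn
    have hknm : kn ≤ m := by omega
    have hcap : ((max (K - 1) 0) : Int) = (capN : Int) := by omega
    rw [List.range_succ, List.foldl_append, List.foldl_append, ← ha, ← hb]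
    simp only [List.foldl_cons, List.foldl_nil]
    -- the value both sides compute at index m
    have hx : PySem.List.pyGetD seq (m : Int) 0 = PySem.List.pyGetD seq (m : Int) 0 := rfl
    -- A's slice = B's window
    have hslice : PySem.List.slice a.1 (some ((m : Int) - a.2)) (some (m : Int))
        = b.1.drop (m - kn) := by
      rw [hk]
      have hcast : (m : Int) - (kn : Int) = ((m - kn : Nat) : Int) := by omega
      rw [hcast, PySem.List.slice_natCast]
      have hmk : m - (m - kn) = kn := by omega
      rw [hmk, hr]
      rw [List.drop_append_of_le_length (by omega)]
      have hlen2 : (b.1.drop (m - kn)).length = kn := by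
        rw [List.length_drop, hlen]; omega
      rw [List.take_append_of_le_length (by omega), List.take_of_length_le (by omega)]
    -- window sums agree, so the computed values agree
    have hv : pyXor (PySem.List.pyGetD seq (m : Int) 0 ::
        PySem.List.slice a.1 (some ((m : Int) - a.2)) (some (m : Int)))
        = PySem.Int.mod (PySem.List.pyGetD seq (m : Int) 0 + b.2) 2 := by
      rw [hslice, pyXor_cons, hw]
    set v : Int := PySem.Int.mod (PySem.List.pyGetD seq (m : Int) 0 + b.2) 2 with hvdef
    -- A's set = B's append (plus the untouched -1 tail)
    have hset : PySem.List.pySetD a.1 (m : Int)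
        (pyXor (PySem.List.pyGetD seq (m : Int) 0 ::
          PySem.List.slice a.1 (some ((m : Int) - a.2)) (some (m : Int))))
        = (b.1 ++ [v]) ++ List.replicate (n - (m + 1)) (-1) := by
      rw [hv, PySem.List.pySetD_natCast, hr]
      have hrep : List.replicate (n - m) (-1 : Int) = -1 :: List.replicate (n - (m + 1)) (-1) := by
        have : n - m = (n - (m + 1)) + 1 := by omega
        rw [this, List.replicate_succ]
      rw [hrep]
      rw [List.set_append_right _ _ (by omega)]
      simp [hlen]
    refine ⟨?_, ?_, ?_, ?_⟩
    · simp [stepB, hlen]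
    · simp only [stepA, stepB, ← hvdef]
      exact hset
    · simp only [stepA, hk]
      split_ifs with h <;> omega
    · simp only [stepB, ← hvdef]
      by_cases hge : (m : Int) ≥ max (K - 1) 0
      · have hcapm : capN ≤ m := by omega
        have hknc : kn = capN := by omega
        rw [if_pos hge]
        have hidx : (m : Int) - max (K - 1) 0 = ((m - capN : Nat) : Int) := by omega
        rw [hidx, PySem.List.pyGetD_natCast]
        have hmin : min (m + 1) capN = capN := by omega
        have hidx2 : m + 1 - capN = (m - capN) + 1 := by omega
        rw [hmin, hidx2]
        have hsum1 : b.2 + v = ((b.1 ++ [v]).drop (m - capN)).sum := by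
          rw [hw]
          have hmk : m - kn = m - capN := by omega
          rw [hmk, List.drop_append_of_le_length (by omega), List.sum_append]
          simp
        have hpeel : ((b.1 ++ [v]).drop (m - capN)).sum
            = (b.1 ++ [v]).getD (m - capN) 0 + ((b.1 ++ [v]).drop (m - capN + 1)).sum :=
          sum_drop_succ _ _ (by simp [hlen])
        rw [hsum1, hpeel]
        ring
      · have hcapm : m < capN := by omega
        rw [if_neg hge]
        have hmin : min (m + 1) capN = m + 1 := by omega
        have hmin0 : min m capN = m := by omega
        rw [hmin]
        have h0' : m + 1 - (m + 1) = 0 := by omega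
        rw [h0', List.drop_zero]
        have hkm : m - kn = 0 := by omega
        rw [hw, hkm, List.drop_zero, List.sum_append]
        simp

-- ===== VERDICT (by name: the statement is the Claim_ definition above) =====
theorem func_spec : Claim_equal_func := by
  intro N K seq _ _
  unfold Spec_func func func_alt
  obtain ⟨hlen, hr, -, -⟩ := inv K seq N.toNat N.toNat (le_refl _)
  simp only [List.length_replicate]
  rw [hr]
  simp
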